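-- pv_equiv track=rewrite | github.com/jeeyeon0523/pythonPrac | Wire나혼자개발한다2.py | solution
-- ===== SOURCE A (Python) =====
-- def solution(minDan, maxDan):
--     answer = 0
--
--     minDan = 1 if minDan <= 0 else minDan
--     maxDan = 19 if maxDan > 19 else maxDan
--
--     for x in range(minDan, maxDan + 1):
--         for i in range(1, 20):
--             if x != i:
--                 answer = answer + x * i
--
--     return answer
-- ===== SOURCE B (Python) =====
-- def solution(minDan, maxDan):
--     lo = 1 if minDan <= 0 else minDan
--     hi = 19 if maxDan > 19 else maxDan
--     if lo > hi:
--         return 0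
--
--     def s1(n):
--         return n * (n + 1) // 2
--
--     def s2(n):
--         return n * (n + 1) * (2 * n + 1) // 6
--
--     return 190 * (s1(hi) - s1(lo - 1)) - (s2(hi) - s2(lo - 1))
-- ===== Notes on version B (the rewrite author's own statement) =====
-- stated objective: simpler
-- what changed: Replaced the nested loops entirely by a loop-free closed form: 190*Sum(x) - Sum(x^2) over the clamped range, via the triangular and square-pyramidal number formulas.
import Mathlib
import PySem

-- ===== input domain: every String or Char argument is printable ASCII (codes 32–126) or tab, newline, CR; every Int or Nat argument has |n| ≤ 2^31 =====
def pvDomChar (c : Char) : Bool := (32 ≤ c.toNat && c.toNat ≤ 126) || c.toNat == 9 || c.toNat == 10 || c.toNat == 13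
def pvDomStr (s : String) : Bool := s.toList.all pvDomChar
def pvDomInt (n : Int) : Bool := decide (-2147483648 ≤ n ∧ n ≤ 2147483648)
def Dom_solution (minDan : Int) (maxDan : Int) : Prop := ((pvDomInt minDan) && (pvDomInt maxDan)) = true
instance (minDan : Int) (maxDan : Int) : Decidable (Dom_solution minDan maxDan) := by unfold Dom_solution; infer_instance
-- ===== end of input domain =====

-- B replaces A's nested loops by a loop-free closed form (190*Sum(x) - Sum(x^2) via triangular and square-pyramidal formulas); simpler, same values.

-- ===== PORT A =====
def solution (minDan : Int) (maxDan : Int) : Int :=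
  let answer : Int := 0
  let minDan := if minDan ≤ 0 then 1 else minDan
  let maxDan := if maxDan > 19 then 19 else maxDan
  (PySem.List.pyRange minDan (maxDan + 1) 1).foldl
    (fun answer x =>
      (PySem.List.pyRange 1 20 1).foldl
        (fun answer i => if x ≠ i then answer + x * i else answer) answer)
    answer

-- ===== PORT B =====
def solution_alt_s1 (n : Int) : Int := PySem.Int.floordiv (n * (n + 1)) 2

def solution_alt_s2 (n : Int) : Int := PySem.Int.floordiv (n * (n + 1) * (2 * n + 1)) 6

def solution_alt (minDan : Int) (maxDan : Int) : Int :=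
  let lo := if minDan ≤ 0 then 1 else minDan
  let hi := if maxDan > 19 then 19 else maxDan
  if lo > hi then 0
  else 190 * (solution_alt_s1 hi - solution_alt_s1 (lo - 1))
         - (solution_alt_s2 hi - solution_alt_s2 (lo - 1))

-- ===== PRECONDITION & SPEC =====
def Spec_solution (minDan : Int) (maxDan : Int) (out : Int) : Prop := out = solution_alt minDan maxDan
instance (minDan : Int) (maxDan : Int) (out : Int) : Decidable (Spec_solution minDan maxDan out) := by unfold Spec_solution; infer_instance

-- ===== CLAIM =====
def Claim_equal_solution : Prop := ∀ (minDan : Int) (maxDan : Int), Dom_solution minDan maxDan → Spec_solution minDan maxDan (solution minDan maxDan)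

-- ===== LEMMAS AND PROOFS =====

-- A's outer loop equals B's closed form for 1 ≤ lo, hi ≤ 19 (finite case analysis).
theorem outer_closed (lo hi : Int) (h1 : 1 ≤ lo) (h2 : hi ≤ 19) :
    (PySem.List.pyRange lo (hi + 1) 1).foldl
      (fun answer x =>
        (PySem.List.pyRange 1 20 1).foldl
          (fun answer i => if x ≠ i then answer + x * i else answer) answer) 0
    = if lo > hi then 0
      else 190 * (solution_alt_s1 hi - solution_alt_s1 (lo - 1))
             - (solution_alt_s2 hi - solution_alt_s2 (lo - 1)) := by
  by_cases hgt : lo > hi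
  · rw [PySem.List.pyRange_one_eq_nil (a := lo) (b := hi + 1) (by omega)]
    simp [hgt]
  · have hlo19 : lo ≤ 19 := by omega
    have hhi1 : 1 ≤ hi := by omega
    -- both lo and hi are in 1..19: finite case analysis
    interval_cases lo <;> interval_cases hi <;> first | omega | decide

theorem solution_spec : Claim_equal_solution := by
  intro minDan maxDan _
  unfold Spec_solution solution solution_alt
  simp only []
  exact outer_closed _ _ (by split_ifs <;> omega) (by split_ifs <;> omega)
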